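-- pv_equiv track=rewrite | github.com/Xopoko/StreamSpark | utils/files.py | is_safe_video_filename
-- ===== SOURCE A (Python) =====
-- from typing import Final
--
-- _ALLOWED_FILENAME_CHARS: Final[set[str]] = set(
--     "abcdefghijklmnopqrstuvwxyzABCDEFGHIJKLMNOPQRSTUVWXYZ0123456789-_."
-- )
--
-- def is_safe_video_filename(filename: str) -> bool:
--     r"""
--     Validate a video filename to prevent path traversal and only allow safe characters.
--
--     Rules:
--     - Non-empty
--     - No path traversal or separators (.., /, \)
--     - Must end with .mp4 (case-insensitive)
--     - Only contains alphanumeric, dash, underscore, and dot characters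
--
--     This mirrors the checks used across routes and OBS widget.
--     """
--     if not filename:
--         return False
--
--     # No path traversal or separators
--     if ".." in filename or "/" in filename or "\\" in filename:
--         return False
--
--     # Enforce extension
--     if not filename.lower().endswith(".mp4"):
--         return False
--
--     # Character whitelist
--     if not all(c in _ALLOWED_FILENAME_CHARS for c in filename):
--         return False
--
--     return True
-- ===== SOURCE B (Python) =====
-- _TAILS = ('.mp4', '.mP4', '.Mp4', '.MP4')
--
--
-- def is_safe_video_filename(filename: str) -> bool:
--     # One fused left-to-right scan (whitelist + no consecutive dots) plus a
--     # direct 4-char suffix table, instead of A's separate substring searches,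
--     # lower()/endswith() pass and all() pass.
--     if len(filename) < 4 or filename[-4:] not in _TAILS:
--         return False
--     prev = ''
--     for c in filename:
--         ok = ('0' <= c <= '9') or ('A' <= c <= 'Z') or ('a' <= c <= 'z') or c in '-_.'
--         if not ok or (c == '.' and prev == '.'):
--             return False
--         prev = c
--     return True
-- ===== Notes on version B (the rewrite author's own statement) =====
-- stated objective: alternative
-- what changed: Replaces A's four separate passes (two substring searches for the traversal/separator patterns, a lowercase-plus-suffix pass and a whole-string whitelist pass) with a single fused left-to-right scan carrying the previous character (whitelist plus no-consecutive-dots, separators being subsumed by the whitelist) and a direct 4-entry case table for the extension suffix.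
import Mathlib
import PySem

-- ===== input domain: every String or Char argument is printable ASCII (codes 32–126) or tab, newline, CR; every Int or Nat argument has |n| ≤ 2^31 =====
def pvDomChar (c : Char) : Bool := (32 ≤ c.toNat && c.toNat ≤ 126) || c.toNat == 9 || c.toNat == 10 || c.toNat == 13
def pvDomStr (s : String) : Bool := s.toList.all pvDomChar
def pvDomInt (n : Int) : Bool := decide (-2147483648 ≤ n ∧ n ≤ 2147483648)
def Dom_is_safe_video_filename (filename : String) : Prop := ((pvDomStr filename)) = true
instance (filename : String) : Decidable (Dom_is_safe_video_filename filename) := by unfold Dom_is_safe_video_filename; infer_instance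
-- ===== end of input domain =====

-- B replaces A's four separate passes (two substring searches, lower+endswith, all-whitelist)
-- by one fused left-to-right scan with a previous-character state plus a 4-entry suffix table (objective: alternative).

-- ===== PORT A =====
def pvAllowed : PySem.Set Char :=
  PySem.Set.ofList "abcdefghijklmnopqrstuvwxyzABCDEFGHIJKLMNOPQRSTUVWXYZ0123456789-_.".toList

def is_safe_video_filename (filename : String) : Bool :=
  if PySem.Str.len filename == 0 then false
  else if PySem.Str.isIn ".." filename || PySem.Str.isIn "/" filename || PySem.Str.isIn "\\" filename then false
  else if !(PySem.Str.endswith (PySem.Str.lower filename) ".mp4") then false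
  else if !(filename.toList.all (fun c => pvAllowed.contains c)) then false
  else true

-- ===== PORT B =====
def pvTails : List (List Char) := [".mp4".toList, ".mP4".toList, ".Mp4".toList, ".MP4".toList]

def pvRangeOk (c : Char) : Bool :=
  ('0' ≤ c && c ≤ '9') || ('A' ≤ c && c ≤ 'Z') || ('a' ≤ c && c ≤ 'z') || "-_.".toList.contains c

def pvScan : List Char → Option Char → Bool
  | [], _ => true
  | c :: rest, prev =>
    if !pvRangeOk c || (c == '.' && prev == some '.') then false
    else pvScan rest (some c)

def is_safe_video_filename_alt (filename : String) : Bool :=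
  if PySem.Str.len filename < 4
      || !(pvTails.contains (PySem.List.slice filename.toList (some (-4)) none)) then false
  else pvScan filename.toList none

-- ===== PRECONDITION & SPEC =====
def Spec_is_safe_video_filename (filename : String) (out : Bool) : Prop := out = is_safe_video_filename_alt filename
instance (filename : String) (out : Bool) : Decidable (Spec_is_safe_video_filename filename out) := by unfold Spec_is_safe_video_filename; infer_instance

-- ===== CLAIM (what is proved, stated in full; the proofs are below) =====
def Claim_equal_is_safe_video_filename : Prop := ∀ (filename : String), Dom_is_safe_video_filename filename → Spec_is_safe_video_filename filename (is_safe_video_filename filename)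

-- ===== LEMMAS AND PROOFS =====

-- "has two consecutive dots" as a structural predicate (the invariant of B's scan)
def pvHasDD : List Char → Bool
  | a :: b :: t => (a == '.' && b == '.') || pvHasDD (b :: t)
  | _ => false

-- per-character table facts, checked over all domain codes (< 127)
theorem pvCharTable : ∀ n < 127,
    (pvAllowed.contains (Char.ofNat n) = pvRangeOk (Char.ofNat n))
    ∧ (PySem.Chars.lowerChar (Char.ofNat n) = '.' ↔ Char.ofNat n = '.')
    ∧ (PySem.Chars.lowerChar (Char.ofNat n) = 'm' ↔ (Char.ofNat n = 'm' ∨ Char.ofNat n = 'M'))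
    ∧ (PySem.Chars.lowerChar (Char.ofNat n) = 'p' ↔ (Char.ofNat n = 'p' ∨ Char.ofNat n = 'P'))
    ∧ (PySem.Chars.lowerChar (Char.ofNat n) = '4' ↔ Char.ofNat n = '4') := by
  set_option maxRecDepth 4096 in decide

theorem pvCharLt127 (c : Char) (h : pvDomChar c = true) : c.toNat < 127 := by
  simp [pvDomChar] at h
  omega

theorem pvTable_of_dom (c : Char) (h : pvDomChar c = true) :
    (pvAllowed.contains c = pvRangeOk c)
    ∧ (PySem.Chars.lowerChar c = '.' ↔ c = '.')
    ∧ (PySem.Chars.lowerChar c = 'm' ↔ (c = 'm' ∨ c = 'M'))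
    ∧ (PySem.Chars.lowerChar c = 'p' ↔ (c = 'p' ∨ c = 'P'))
    ∧ (PySem.Chars.lowerChar c = '4' ↔ c = '4') := by
  have h1 := pvCharTable c.toNat (pvCharLt127 c h)
  rwa [Char.ofNat_toNat] at h1

theorem pvHasDD_cons (c : Char) (rest : List Char) :
    pvHasDD (c :: rest) = ((c == '.' && rest.head? == some '.') || pvHasDD rest) := by
  cases rest <;> simp [pvHasDD]

theorem pvScan_eq (cs : List Char) : ∀ prev,
    pvScan cs prev = (cs.all pvRangeOk && !pvHasDD cs
      && !(prev == some '.' && cs.head? == some '.')) := by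
  induction cs with
  | nil => intro prev; simp [pvScan, pvHasDD]
  | cons c rest ih =>
    intro prev
    rw [pvScan, ih (some c), pvHasDD_cons, Bool.eq_iff_iff]
    by_cases hR : pvRangeOk c = true <;> by_cases hc : c = '.' <;>
      cases prev <;> simp_all <;> tauto

theorem pvPrefixDD (a : Char) (t : List Char) :
    (['.', '.'] <+: a :: t) ↔ (a = '.' ∧ t.head? = some '.') := by
  cases t with
  | nil => simp [List.cons_prefix_cons]
  | cons b u => simp [List.cons_prefix_cons]; tauto

theorem pvHasDD_iff (cs : List Char) : pvHasDD cs = true ↔ ['.', '.'] <:+: cs := by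
  induction cs with
  | nil => simp [pvHasDD]
  | cons a t ih =>
    rw [pvHasDD_cons, List.infix_cons_iff, pvPrefixDD, Bool.or_eq_true, ih,
      Bool.and_eq_true, beq_iff_eq, beq_iff_eq]

theorem pvSingleton_infix {α : Type} (a : α) (cs : List α) : [a] <:+: cs ↔ a ∈ cs := by
  constructor
  · intro h; exact h.mem (by simp)
  · intro h
    obtain ⟨s, t, rfl⟩ := List.mem_iff_append.mp h
    exact ⟨s, t, by simp⟩

-- the extension check of A equals B's suffix-table check
theorem pvExt_iff (cs : List Char) (hdom : ∀ c ∈ cs, pvDomChar c = true) :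
    (PySem.Chars.endswith (PySem.Chars.lower cs) ".mp4".toList = true)
      ↔ (4 ≤ cs.length ∧ cs.drop (cs.length - 4) ∈ pvTails) := by
  rw [PySem.Chars.endswith_iff, List.suffix_iff_eq_drop]
  have hlen : (PySem.Chars.lower cs).length = cs.length := by
    simp [PySem.Chars.lower]
  rw [hlen]
  have hdrop : (PySem.Chars.lower cs).drop (cs.length - ".mp4".toList.length)
      = PySem.Chars.lower (cs.drop (cs.length - ".mp4".toList.length)) := by
    simp [PySem.Chars.lower, List.map_drop]
  rw [hdrop]
  by_cases h4 : 4 ≤ cs.length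
  · have hlt : ".mp4".toList.length = 4 := by decide
    rw [hlt]
    set l4 := cs.drop (cs.length - 4) with hl4
    have hlen4 : l4.length = 4 := by
      rw [hl4, List.length_drop]; omega
    have hmem : ∀ c ∈ l4, pvDomChar c = true := fun c hc => hdom c (List.mem_of_mem_drop hc)
    match l4, hlen4 with
    | [a, b, c, d], _ =>
      have ha := (pvTable_of_dom a (hmem a (by simp))).2.1
      have hb := (pvTable_of_dom b (hmem b (by simp))).2.2.1
      have hc := (pvTable_of_dom c (hmem c (by simp))).2.2.2.1
      have hd := (pvTable_of_dom d (hmem d (by simp))).2.2.2.2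
      simp only [h4, true_and, pvTails]
      constructor
      · intro h
        have h' : PySem.Chars.lowerChar a = '.' ∧ PySem.Chars.lowerChar b = 'm'
            ∧ PySem.Chars.lowerChar c = 'p' ∧ PySem.Chars.lowerChar d = '4' := by
          simpa [PySem.Chars.lower] using h.symm
        rcases ha.mp h'.1 with rfl
        rcases hd.mp h'.2.2.2 with rfl
        rcases hb.mp h'.2.1 with rfl | rfl <;> rcases hc.mp h'.2.2.1 with rfl | rfl <;> simp
      · intro h
        have h' : a = '.' ∧ (b = 'm' ∨ b = 'M') ∧ (c = 'p' ∨ c = 'P') ∧ d = '4' := by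
          simp at h
          rcases h with ⟨rfl, rfl, rfl, rfl⟩ | ⟨rfl, rfl, rfl, rfl⟩ | ⟨rfl, rfl, rfl, rfl⟩ | ⟨rfl, rfl, rfl, rfl⟩ <;> simp
        symm
        simp only [PySem.Chars.lower, List.map]
        rcases h' with ⟨rfl, hb', hc', rfl⟩
        have e1 : PySem.Chars.lowerChar '.' = '.' := ha.mpr rfl
        have e4 : PySem.Chars.lowerChar '4' = '4' := hd.mpr rfl
        have e2 : PySem.Chars.lowerChar b = 'm' := hb.mpr hb'
        have e3 : PySem.Chars.lowerChar c = 'p' := hc.mpr hc'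
        simp [e1, e2, e3, e4]
  · constructor
    · intro h
      have := congrArg List.length h
      simp [PySem.Chars.lower] at this
      omega
    · intro h; omega

theorem pvAll_eq (cs : List Char) (hdom : ∀ c ∈ cs, pvDomChar c = true) :
    cs.all (fun c => pvAllowed.contains c) = cs.all pvRangeOk := by
  induction cs with
  | nil => simp
  | cons c t ih =>
    have h1 := (pvTable_of_dom c (hdom c (by simp))).1
    simp only [List.all_cons, h1, ih (fun x hx => hdom x (by simp [hx]))]

theorem pvNoSlash (cs : List Char) (x : Char) (hall : cs.all pvRangeOk = true)
    (hx : pvRangeOk x = false) : x ∉ cs := by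
  intro hmem
  have := List.all_eq_true.mp hall x hmem
  rw [hx] at this
  exact Bool.false_ne_true this

-- ===== VERDICT (by name: the statement is the Claim_ definition above) =====
set_option maxRecDepth 8192 in
theorem is_safe_video_filename_spec : Claim_equal_is_safe_video_filename := by
  intro filename hdom
  unfold Spec_is_safe_video_filename
  have hdom' : ∀ c ∈ filename.toList, pvDomChar c = true := by
    have := hdom
    unfold Dom_is_safe_video_filename pvDomStr at this
    exact List.all_eq_true.mp this
  have hlen : PySem.Str.len filename = (filename.toList.length : Int) := by
    simp [PySem.Str.len_eq]
  set cs := filename.toList with hcs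
  have hslice : PySem.List.slice cs (some (-4)) none = cs.drop (cs.length - 4) :=
    PySem.List.slice_from_neg_ofNat cs 4 (by omega)
  have hext := pvExt_iff cs hdom'
  have hextE : PySem.Str.endswith (PySem.Str.lower filename) ".mp4"
      = PySem.Chars.endswith (PySem.Chars.lower cs) ".mp4".toList := by
    rw [PySem.Str.endswith_eq, PySem.Str.toList_lower]
  by_cases hB : 4 ≤ cs.length ∧ cs.drop (cs.length - 4) ∈ pvTails
  · -- suffix good: A's extension test passes; compare the remaining checks
    have hend : PySem.Chars.endswith (PySem.Chars.lower cs) ".mp4".toList = true := hext.mpr hB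
    have hc : pvTails.contains (cs.drop (cs.length - 4)) = true := by
      simpa [List.contains_iff_mem] using hB.2
    have hno : ¬ ((cs.length : Int) < 4) := by
      have := hB.1; omega
    have hBval : is_safe_video_filename_alt filename
        = (cs.all pvRangeOk && !pvHasDD cs) := by
      unfold is_safe_video_filename_alt
      rw [← hcs, hslice, hlen, hc, pvScan_eq]
      simp [hno]
    rw [hBval]
    unfold is_safe_video_filename
    rw [← hcs, hlen, hextE, hend]
    have hne : ¬ ((cs.length : Int) == 0) = true := by
      have := hB.1; simp only [beq_iff_eq]; omega
    by_cases hall : cs.all pvRangeOk = true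
    · have hslash : PySem.Str.isIn "/" filename = false := by
        rw [Bool.eq_false_iff]
        intro h
        have h2 := (PySem.Str.isIn_iff_infix _ _).mp h
        rw [show ("/" : String).toList = ['/'] from rfl, pvSingleton_infix] at h2
        exact pvNoSlash cs '/' hall (by decide) h2
      have hbk : PySem.Str.isIn "\\" filename = false := by
        rw [Bool.eq_false_iff]
        intro h
        have h2 := (PySem.Str.isIn_iff_infix _ _).mp h
        rw [show ("\\" : String).toList = ['\\'] from rfl, pvSingleton_infix] at h2
        exact pvNoSlash cs '\\' hall (by decide) h2
      have hdd : PySem.Str.isIn ".." filename = pvHasDD cs := by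
        have hiff : PySem.Str.isIn ".." filename = true ↔ pvHasDD cs = true := by
          rw [PySem.Str.isIn_iff_infix, show (".." : String).toList = ['.', '.'] from rfl,
            pvHasDD_iff]
        by_cases h : pvHasDD cs = true
        · rw [h, hiff.mpr h]
        · rw [Bool.eq_false_iff.mpr h, Bool.eq_false_iff.mpr (fun hx => h (hiff.mp hx))]
      have hW : cs.all (fun c => pvAllowed.contains c) = true := by
        rw [pvAll_eq cs hdom']; exact hall
      rw [hslash, hbk, hdd, hW]
      simp only [if_neg hne, Bool.or_false, hall, Bool.not_true, Bool.true_and]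
      by_cases h : pvHasDD cs = true <;> simp [h]
    · have hW : cs.all (fun c => pvAllowed.contains c) = false := by
        rw [pvAll_eq cs hdom']; exact Bool.eq_false_iff.mpr hall
      rw [Bool.eq_false_iff.mpr hall]
      simp only [Bool.false_and]
      split_ifs <;> simp_all
  · -- suffix bad: both return false
    have hend : PySem.Chars.endswith (PySem.Chars.lower cs) ".mp4".toList = false := by
      rw [Bool.eq_false_iff]; intro h; exact hB (hext.mp h)
    have hBval : is_safe_video_filename_alt filename = false := by
      unfold is_safe_video_filename_alt
      rw [← hcs, hslice, hlen]
      by_cases h4 : 4 ≤ cs.length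
      · have hc : pvTails.contains (cs.drop (cs.length - 4)) = false := by
          rw [Bool.eq_false_iff]
          intro h
          exact hB ⟨h4, by simpa [List.contains_iff_mem] using h⟩
        rw [hc]
        simp
      · have h4' : (cs.length : Int) < 4 := by omega
        simp [h4']
    rw [hBval]
    unfold is_safe_video_filename
    rw [← hcs, hlen, hextE, hend]
    split_ifs <;> simp_all
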